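-- pv_equiv track=rewrite | github.com/AdityaTheTechGuy/ShopWaveAgent-Hackathon26 | tools.py | extract_kb_highlights
-- ===== SOURCE A (Python) =====
-- def extract_kb_highlights(content: str, query_tokens: set[str], max_lines: int = 4) -> list[str]:
--     """Extract the most relevant lines from a KB section."""
--     highlights = []
--     for line in content.splitlines():
--         cleaned = line.strip()
--         if not cleaned:
--             continue
--         lowered = cleaned.lower()
--         if any(tok in lowered for tok in query_tokens):
--             highlights.append(cleaned)
--         if len(highlights) >= max_lines:
--             break
--     if highlights:
--         return highlights
--
--     # Fallback to first few non-empty lines when no token match is found.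
--     for line in content.splitlines():
--         cleaned = line.strip()
--         if cleaned:
--             highlights.append(cleaned)
--         if len(highlights) >= max_lines:
--             break
--     return highlights
-- ===== SOURCE B (Python) =====
-- def extract_kb_highlights(content: str, query_tokens: set[str], max_lines: int = 4) -> list[str]:
--     """Extract the most relevant lines from a KB section."""
--     cleaned = [s for s in (line.strip() for line in content.splitlines()) if s]
--     matches = [s for s in cleaned if any(tok in s.lower() for tok in query_tokens)]
--     chosen = matches or cleaned
--     return chosen[:max_lines]
-- ===== Notes on version B (the rewrite author's own statement) =====
-- stated objective: simpler
-- what changed: Replaces A's two early-exit accumulator loops (with in-loop break counters) by materializing the stripped non-empty lines once, filtering the token matches with a comprehension, and returning a single slice chosen[:max_lines].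
-- outside the precondition, e.g. on extract_kb_highlights('a\nb', set(), 0): A returns ['a'], B returns []; on extract_kb_highlights('a\nb\nc', set(), -1): A returns ['a'], B returns ['a', 'b']
import Mathlib
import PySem

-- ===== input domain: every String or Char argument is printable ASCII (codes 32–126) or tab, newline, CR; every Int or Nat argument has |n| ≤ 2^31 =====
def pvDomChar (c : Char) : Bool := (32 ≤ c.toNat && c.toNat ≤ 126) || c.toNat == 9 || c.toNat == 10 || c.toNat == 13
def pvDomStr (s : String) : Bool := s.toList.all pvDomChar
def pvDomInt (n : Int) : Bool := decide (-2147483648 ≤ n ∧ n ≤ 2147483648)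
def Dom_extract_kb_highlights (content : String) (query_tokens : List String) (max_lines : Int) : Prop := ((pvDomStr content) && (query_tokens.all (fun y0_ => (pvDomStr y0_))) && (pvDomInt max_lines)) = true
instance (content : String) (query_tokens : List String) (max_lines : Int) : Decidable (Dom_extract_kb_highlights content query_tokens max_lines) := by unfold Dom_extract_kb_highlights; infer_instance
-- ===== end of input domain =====

-- B replaces A's two early-exit accumulator loops by one materialized list of stripped
-- non-empty lines, a filtered match list, and a single slice chosen[:max_lines] (objective: simpler).


-- ===== PORT A =====
-- first loop: collect matching stripped lines, break once len(highlights) >= max_lines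
def pvALoop1 (query_tokens : List String) (max_lines : Int) : List String → List String → List String
  | [], highlights => highlights
  | line :: rest, highlights =>
    let cleaned := PySem.Str.strip line
    if cleaned = "" then pvALoop1 query_tokens max_lines rest highlights
    else
      let lowered := PySem.Str.lower cleaned
      let highlights' := if query_tokens.any (fun tok => PySem.Str.isIn tok lowered) then highlights ++ [cleaned] else highlights
      if max_lines ≤ (highlights'.length : Int) then highlights'
      else pvALoop1 query_tokens max_lines rest highlights'

-- fallback loop: collect first non-empty stripped lines, break once len(highlights) >= max_lines
def pvALoop2 (max_lines : Int) : List String → List String → List String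
  | [], highlights => highlights
  | line :: rest, highlights =>
    let cleaned := PySem.Str.strip line
    let highlights' := if cleaned = "" then highlights else highlights ++ [cleaned]
    if max_lines ≤ (highlights'.length : Int) then highlights'
    else pvALoop2 max_lines rest highlights'

def extract_kb_highlights (content : String) (query_tokens : List String) (max_lines : Int) : List String :=
  let highlights := pvALoop1 query_tokens max_lines (PySem.Str.splitlines content) []
  if highlights ≠ [] then highlights
  else pvALoop2 max_lines (PySem.Str.splitlines content) highlights

-- ===== PORT B =====
def extract_kb_highlights_alt (content : String) (query_tokens : List String) (max_lines : Int) : List String :=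
  let cleaned := ((PySem.Str.splitlines content).map PySem.Str.strip).filter (fun s => s ≠ "")
  let matched := cleaned.filter (fun s => query_tokens.any (fun tok => PySem.Str.isIn tok (PySem.Str.lower s)))
  let chosen := if matched ≠ [] then matched else cleaned
  PySem.List.slice chosen none (some max_lines)

-- ===== PRECONDITION & SPEC =====
-- Pre_ excludes non-positive max_lines, outside the natural domain of a positive line-count cap:
-- there A's post-append break still returns up to one line while B's plain slice does not.
def Pre_extract_kb_highlights (content : String) (query_tokens : List String) (max_lines : Int) : Prop := 1 ≤ max_lines
instance (content : String) (query_tokens : List String) (max_lines : Int) : Decidable (Pre_extract_kb_highlights content query_tokens max_lines) := by unfold Pre_extract_kb_highlights; infer_instance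

def pvWitness_extract_kb_highlights : String × List String × Int := ("Shipping: 3 days\n\n  Returns are free  ", ["returns"], 2)

def Spec_extract_kb_highlights (content : String) (query_tokens : List String) (max_lines : Int) (out : List String) : Prop := out = extract_kb_highlights_alt content query_tokens max_lines
instance (content : String) (query_tokens : List String) (max_lines : Int) (out : List String) : Decidable (Spec_extract_kb_highlights content query_tokens max_lines out) := by unfold Spec_extract_kb_highlights; infer_instance

-- ===== CLAIM (what is proved, stated in full; the proofs are below) =====
def Claim_equal_extract_kb_highlights : Prop := ∀ (content : String) (query_tokens : List String) (max_lines : Int), Dom_extract_kb_highlights content query_tokens max_lines → Pre_extract_kb_highlights content query_tokens max_lines → Spec_extract_kb_highlights content query_tokens max_lines (extract_kb_highlights content query_tokens max_lines)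

-- ===== LEMMAS AND PROOFS =====

-- take of a list shorter than or reaching the bound, helper for the break step
theorem pv_take_snoc {α : Type} (acc : List α) (x : α) (l : List α) :
    (acc ++ x :: l).take (acc.length + 1) = acc ++ [x] := by
  simp [List.take_append, List.take_of_length_le (Nat.le_succ _)]

-- A's first loop, started below the cap, returns the first max_lines matching lines appended to acc.
theorem pvALoop1_eq (query_tokens : List String) (max_lines : Int) (lines acc : List String)
    (h : (acc.length : Int) < max_lines) :
    pvALoop1 query_tokens max_lines lines acc =
      List.take max_lines.toNat
        (acc ++ ((lines.map PySem.Str.strip).filter (fun s => s ≠ "")).filter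
          (fun s => query_tokens.any (fun tok => PySem.Str.isIn tok (PySem.Str.lower s)))) := by
  induction lines generalizing acc with
  | nil =>
    simp [pvALoop1, List.take_of_length_le (by omega : acc.length ≤ max_lines.toNat)]
  | cons line rest ih =>
    by_cases hc : PySem.Str.strip line = ""
    · rw [List.map_cons, List.filter_cons_of_neg (by simp [hc])]
      simpa [pvALoop1, hc] using ih acc h
    · rw [List.map_cons, List.filter_cons_of_pos (by simp [hc])]
      by_cases hm : query_tokens.any (fun tok => PySem.Str.isIn tok (PySem.Str.lower (PySem.Str.strip line))) = true
      · rw [List.filter_cons_of_pos (by simpa using hm)]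
        by_cases hb : max_lines ≤ ((acc ++ [PySem.Str.strip line]).length : Int)
        · have hmax : max_lines.toNat = acc.length + 1 := by simp at hb; omega
          simp only [pvALoop1, hc, if_false, hm, if_true, hb, hmax]
          exact (pv_take_snoc acc _ _).symm
        · have h2 : ((acc ++ [PySem.Str.strip line]).length : Int) < max_lines := by
            simp at hb ⊢; omega
          simp only [pvALoop1, hc, if_false, hm, if_true, hb]
          rw [ih (acc ++ [PySem.Str.strip line]) h2, List.append_assoc, List.singleton_append]
      · rw [List.filter_cons_of_neg (by simpa using hm)]
        have hb : ¬ max_lines ≤ (acc.length : Int) := by omega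
        simp only [pvALoop1, hc, if_false, hm, Bool.false_eq_true, if_false, hb]
        exact ih acc h

-- A's fallback loop, started below the cap, returns the first max_lines non-empty stripped lines.
theorem pvALoop2_eq (max_lines : Int) (lines acc : List String)
    (h : (acc.length : Int) < max_lines) :
    pvALoop2 max_lines lines acc =
      List.take max_lines.toNat (acc ++ (lines.map PySem.Str.strip).filter (fun s => s ≠ "")) := by
  induction lines generalizing acc with
  | nil =>
    simp [pvALoop2, List.take_of_length_le (by omega : acc.length ≤ max_lines.toNat)]
  | cons line rest ih =>
    by_cases hc : PySem.Str.strip line = ""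
    · have hb : ¬ max_lines ≤ (acc.length : Int) := by omega
      simpa [pvALoop2, hc, hb] using ih acc h
    · by_cases hb : max_lines ≤ ((acc ++ [PySem.Str.strip line]).length : Int)
      · have hmax : max_lines.toNat = acc.length + 1 := by simp at hb; omega
        simp only [pvALoop2, hc, if_false, hb, if_true, hmax,
          List.map_cons, List.filter_cons, decide_eq_true_eq]
        simp [hc, pv_take_snoc]
      · have h2 : ((acc ++ [PySem.Str.strip line]).length : Int) < max_lines := by
          simp at hb ⊢; omega
        simp only [pvALoop2, hc, if_false, hb,
          List.map_cons, List.filter_cons, decide_eq_true_eq]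
        simpa [hc] using ih (acc ++ [PySem.Str.strip line]) h2

-- ===== VERDICT (by name: the statement is the Claim_ definition above) =====
theorem extract_kb_highlights_spec : Claim_equal_extract_kb_highlights := by
  intro content query_tokens max_lines _hdom hpre
  unfold Pre_extract_kb_highlights at hpre
  unfold Spec_extract_kb_highlights extract_kb_highlights extract_kb_highlights_alt
  have h0 : ((0 : Int) : Int) ≤ max_lines := by omega
  set C := ((PySem.Str.splitlines content).map PySem.Str.strip).filter (fun s => s ≠ "") with hC
  set M := C.filter (fun s => query_tokens.any (fun tok => PySem.Str.isIn tok (PySem.Str.lower s))) with hM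
  have hl1 : pvALoop1 query_tokens max_lines (PySem.Str.splitlines content) [] =
      List.take max_lines.toNat M := by
    simpa [hM, hC] using pvALoop1_eq query_tokens max_lines (PySem.Str.splitlines content) [] (by simpa using hpre)
  have hslice : PySem.List.slice (if M ≠ [] then M else C) none (some max_lines) =
      List.take max_lines.toNat (if M ≠ [] then M else C) :=
    PySem.List.slice_to _ (by omega)
  rw [hl1, hslice]
  by_cases hMe : M = []
  · have hl2 : pvALoop2 max_lines (PySem.Str.splitlines content) [] =
        List.take max_lines.toNat C := by
      simpa [hC] using pvALoop2_eq max_lines (PySem.Str.splitlines content) [] (by simpa using hpre)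
    simp [hMe, hl2]
  · have htk : List.take max_lines.toNat M ≠ [] := by
      have : max_lines.toNat ≠ 0 := by omega
      simp [List.take_eq_nil_iff, this, hMe]
    simp [hMe, htk]
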